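-- pv_equiv track=rewrite | github.com/pmantica1/geoencoder | geoencoder/grid_encoder.py | check_if_wrap_around
-- ===== SOURCE A (Python) =====
-- def check_if_wrap_around(exists_val_in_cols):
--     has_seen_start = False
--     has_seen_end = False
--     for exists_val_in_col in exists_val_in_cols:
--         if has_seen_end:
--             if exists_val_in_col:
--                 return True
--         elif has_seen_start:
--             if not exists_val_in_col:
--                 has_seen_end = True
--         else:
--             if exists_val_in_col:
--                 has_seen_start = True
--     return False
-- ===== SOURCE B (Python) =====
-- def check_if_wrap_around(exists_val_in_cols):
--     # A wrap-around pattern exists iff the sequence contains at least two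
--     # maximal runs of truthy values, i.e. at least two rising (falsy->truthy)
--     # edges in the sequence padded with a leading False.
--     bs = [bool(v) for v in exists_val_in_cols]
--     rising_edges = sum(1 for prev, cur in zip([False] + bs, bs) if cur and not prev)
--     return rising_edges >= 2
-- ===== Notes on version B (the rewrite author's own statement) =====
-- stated objective: alternative
-- what changed: Replaced the two-flag early-returning state machine with a stateless arithmetic formulation: count rising (falsy->truthy) edges over adjacent pairs of the padded sequence and return whether there are at least two truthy runs.
import Mathlib
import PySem

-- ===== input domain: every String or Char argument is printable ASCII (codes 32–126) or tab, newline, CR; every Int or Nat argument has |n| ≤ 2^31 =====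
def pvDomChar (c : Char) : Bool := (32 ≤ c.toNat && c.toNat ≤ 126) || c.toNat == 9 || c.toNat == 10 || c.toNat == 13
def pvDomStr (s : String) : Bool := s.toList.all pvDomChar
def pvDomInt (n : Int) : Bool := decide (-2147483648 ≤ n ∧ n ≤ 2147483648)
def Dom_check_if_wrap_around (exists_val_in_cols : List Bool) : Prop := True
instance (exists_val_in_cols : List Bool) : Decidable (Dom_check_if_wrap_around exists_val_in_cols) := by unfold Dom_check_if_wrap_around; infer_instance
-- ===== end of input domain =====

-- ===== PORT A =====
-- B replaces A's early-returning two-flag state machine with a stateless count of rising edges (objective: alternative).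
-- literal transliteration of A's flag loop as structural recursion with state (has_seen_start, has_seen_end)
def check_if_wrap_around_go (has_seen_start has_seen_end : Bool) : List Bool → Bool
  | [] => false
  | v :: rest =>
    if has_seen_end then
      if v then true else check_if_wrap_around_go has_seen_start has_seen_end rest
    else if has_seen_start then
      if !v then check_if_wrap_around_go has_seen_start true rest
      else check_if_wrap_around_go has_seen_start has_seen_end rest
    else
      if v then check_if_wrap_around_go true has_seen_end rest
      else check_if_wrap_around_go has_seen_start has_seen_end rest

def check_if_wrap_around (exists_val_in_cols : List Bool) : Bool :=
  check_if_wrap_around_go false false exists_val_in_cols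

-- ===== PORT B =====
-- Source B's edge count: sum over zip([False]+bs, bs) of pairs (prev, cur) with cur and not prev
def cwaEdges (bs : List Bool) : Nat :=
  ((false :: bs).zip bs).foldl (fun n pc => if pc.2 && !pc.1 then n + 1 else n) 0

def check_if_wrap_around_alt (exists_val_in_cols : List Bool) : Bool :=
  decide (2 ≤ cwaEdges exists_val_in_cols)

-- ===== PRECONDITION & SPEC =====
def Spec_check_if_wrap_around (exists_val_in_cols : List Bool) (out : Bool) : Prop := out = check_if_wrap_around_alt exists_val_in_cols
instance (exists_val_in_cols : List Bool) (out : Bool) : Decidable (Spec_check_if_wrap_around exists_val_in_cols out) := by unfold Spec_check_if_wrap_around; infer_instance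

-- ===== CLAIM (what is proved, stated in full; the proofs are below) =====
def Claim_equal_check_if_wrap_around : Prop := ∀ (exists_val_in_cols : List Bool), Dom_check_if_wrap_around exists_val_in_cols → Spec_check_if_wrap_around exists_val_in_cols (check_if_wrap_around exists_val_in_cols)

-- ===== LEMMAS AND PROOFS =====
-- recursive characterisation of the edge count, with the previous element as state
def cwaRC (prev : Bool) : List Bool → Nat
  | [] => 0
  | v :: rest => (if v && !prev then 1 else 0) + cwaRC v rest

lemma cwaEdges_foldl (bs : List Bool) (prev : Bool) (n : Nat) :
    ((prev :: bs).zip bs).foldl (fun n pc => if pc.2 && !pc.1 then n + 1 else n) n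
      = n + cwaRC prev bs := by
  induction bs generalizing prev n with
  | nil => simp [cwaRC]
  | cons v rest ih =>
    simp only [List.zip_cons_cons, List.foldl_cons, cwaRC, ih]
    cases v <;> cases prev <;> simp <;> omega

-- with has_seen_end set, A's loop returns true iff a truthy value remains, i.e. rc false ≥ 1
lemma go_end (hs : Bool) (xs : List Bool) :
    check_if_wrap_around_go hs true xs = decide (1 ≤ cwaRC false xs) := by
  induction xs with
  | nil => simp [check_if_wrap_around_go, cwaRC]
  | cons v rest ih =>
    cases v <;> simp [check_if_wrap_around_go, cwaRC, ih]

-- with has_seen_start set, A's loop returns true iff a further rising edge exists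
lemma go_start (xs : List Bool) :
    check_if_wrap_around_go true false xs = decide (1 ≤ cwaRC true xs) := by
  induction xs with
  | nil => simp [check_if_wrap_around_go, cwaRC]
  | cons v rest ih =>
    cases v <;> simp [check_if_wrap_around_go, cwaRC, ih, go_end]

-- from the initial state, A's loop returns true iff there are at least two rising edges
lemma go_init (xs : List Bool) :
    check_if_wrap_around_go false false xs = decide (2 ≤ cwaRC false xs) := by
  induction xs with
  | nil => simp [check_if_wrap_around_go, cwaRC]
  | cons v rest ih =>
    cases v <;> simp [check_if_wrap_around_go, cwaRC, ih, go_start] <;> omega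

-- ===== VERDICT (by name: the statement is the Claim_ definition above) =====
theorem check_if_wrap_around_spec : Claim_equal_check_if_wrap_around := by
  intro xs _
  unfold Spec_check_if_wrap_around check_if_wrap_around check_if_wrap_around_alt cwaEdges
  rw [go_init, cwaEdges_foldl]
  simp
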